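-- pv_equiv track=rewrite | github.com/msilverblatt/harness-ml | packages/harness-core/src/harnessml/core/runner/training/cv_strategies.py | _expanding_window_folds
-- ===== SOURCE A (Python) =====
-- def _expanding_window_folds(
--     folds: list[int],
--     min_train_folds: int,
--     training_pool: list[int] | None = None,
-- ) -> list[tuple[list[int], int]]:
--     """Expanding window: each fold tested using all prior folds only.
--
--     Unlike LOSO, this is temporal — only folds with values less than
--     the test fold are used for training. min_train_folds controls the
--     minimum number of training folds required.
--     """
--     pool = sorted(training_pool or folds)
--     result = []
--     for test_fold in folds:
--         train_folds = [f for f in pool if f < test_fold]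
--         if len(train_folds) < min_train_folds:
--             continue
--         result.append((train_folds, test_fold))
--     return result
-- ===== SOURCE B (Python) =====
-- def _expanding_window_folds(
--     folds: list[int],
--     min_train_folds: int,
--     training_pool: list[int] | None = None,
-- ) -> list[tuple[list[int], int]]:
--     """Expanding window via a single merge-style sweep: walk the sorted pool
--     once across the sorted distinct test values with a moving pointer,
--     recording for each value the cut index (count of pool elements below it),
--     then emit each qualifying fold's pool prefix by dictionary lookup."""
--     pool = sorted(training_pool or folds)
--     cut = {}
--     i = 0
--     for v in sorted(set(folds)):
--         while i < len(pool) and pool[i] < v: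
--             i += 1
--         cut[v] = i
--     result = []
--     for t in folds:
--         k = cut[t]
--         if k >= min_train_folds:
--             result.append((pool[:k], t))
--     return result
-- ===== Notes on version B (the rewrite author's own statement) =====
-- stated objective: faster
-- what changed: Instead of re-scanning the pool for every test fold, B does one merge-style sweep: a single pointer walks the sorted pool across the sorted distinct fold values, building a dict from each value to its cut index, and the result is emitted by dict lookup plus a prefix slice.
import Mathlib
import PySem

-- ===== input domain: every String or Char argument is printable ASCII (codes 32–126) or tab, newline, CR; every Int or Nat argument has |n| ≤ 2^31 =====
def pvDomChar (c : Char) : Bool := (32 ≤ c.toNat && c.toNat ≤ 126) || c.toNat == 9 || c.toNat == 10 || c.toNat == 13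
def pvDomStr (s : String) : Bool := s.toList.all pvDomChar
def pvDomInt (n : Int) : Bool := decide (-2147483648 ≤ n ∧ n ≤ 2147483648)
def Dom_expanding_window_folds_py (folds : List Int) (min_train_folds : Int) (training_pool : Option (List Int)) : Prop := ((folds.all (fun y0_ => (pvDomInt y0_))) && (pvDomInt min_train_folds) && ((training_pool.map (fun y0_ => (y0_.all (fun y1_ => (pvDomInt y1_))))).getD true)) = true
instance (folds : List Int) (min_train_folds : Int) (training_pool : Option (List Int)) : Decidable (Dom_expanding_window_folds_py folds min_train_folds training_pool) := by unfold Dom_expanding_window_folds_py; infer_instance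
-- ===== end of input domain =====

-- ===== PORT A =====
-- B replaces A's per-fold rescan of the pool by one merge-style sweep that precomputes each
-- distinct fold value's cut index in a dict (alternative decomposition, same results).
def expanding_window_folds_py (folds : List Int) (min_train_folds : Int) (training_pool : Option (List Int)) : List (List Int × Int) :=
  -- pool = sorted(training_pool or folds)  ('or' treats None and [] as falsy)
  let pool : List Int :=
    PySem.List.sorted (match training_pool with
      | some tp => if tp = [] then folds else tp
      | none => folds) (fun x => x) false
  folds.foldl (fun result test_fold =>
    let train_folds := pool.filter (fun f => decide (f < test_fold))
    if (train_folds.length : Int) < min_train_folds then result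
    else result ++ [(train_folds, test_fold)]) []

-- ===== PORT B =====
-- while i < len(pool) and pool[i] < v: i += 1   (returns the final i)
def pvAdvance (pool : List Int) (v : Int) (i : Nat) : Nat :=
  if h : i < pool.length then
    if pool[i] < v then pvAdvance pool v (i + 1) else i
  else i
termination_by pool.length - i

def expanding_window_folds_py_alt (folds : List Int) (min_train_folds : Int) (training_pool : Option (List Int)) : List (List Int × Int) :=
  let pool : List Int :=
    PySem.List.sorted (match training_pool with
      | some tp => if tp = [] then folds else tp
      | none => folds) (fun x => x) false
  -- for v in sorted(set(folds)): advance i; cut[v] = i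
  let vals : List Int := PySem.List.sorted (PySem.Set.ofList folds) (fun x => x) false
  let cut : PySem.Dict Int Int :=
    (vals.foldl (fun (st : Nat × PySem.Dict Int Int) v =>
        let i := pvAdvance pool v st.1
        (i, st.2.insert v (i : Int))) (0, PySem.Dict.empty)).2
  folds.foldl (fun result t =>
    let k := cut.getD t 0   -- cut[t]; the key is present for every t in folds
    if k ≥ min_train_folds then result ++ [(PySem.List.slice pool none (some k), t)]
    else result) []

-- ===== PRECONDITION & SPEC =====
def Spec_expanding_window_folds_py (folds : List Int) (min_train_folds : Int) (training_pool : Option (List Int)) (out : List (List Int × Int)) : Prop := out = expanding_window_folds_py_alt folds min_train_folds training_pool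
instance (folds : List Int) (min_train_folds : Int) (training_pool : Option (List Int)) (out : List (List Int × Int)) : Decidable (Spec_expanding_window_folds_py folds min_train_folds training_pool out) := by unfold Spec_expanding_window_folds_py; infer_instance

-- ===== CLAIM (what is proved, stated in full; the proofs are below) =====
def Claim_equal_expanding_window_folds_py : Prop := ∀ (folds : List Int) (min_train_folds : Int) (training_pool : Option (List Int)), Dom_expanding_window_folds_py folds min_train_folds training_pool → Spec_expanding_window_folds_py folds min_train_folds training_pool (expanding_window_folds_py folds min_train_folds training_pool)

-- ===== LEMMAS AND PROOFS =====

-- On a sorted list, filtering the elements < t yields exactly the prefix up to bisect_left.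
theorem filter_lt_eq_take_bisectLeft (xs : List Int) (t : Int)
    (h : xs.Pairwise (fun a b => a ≤ b)) :
    xs.filter (fun f => decide (f < t)) = xs.take (PySem.List.bisectLeft xs t) := by
  obtain ⟨hle, hlt, hge⟩ := PySem.List.bisectLeft_spec xs t h
  set idx := PySem.List.bisectLeft xs t with hidx
  have htake : (xs.take idx).filter (fun f => decide (f < t)) = xs.take idx := by
    apply List.filter_eq_self.mpr
    intro a ha
    obtain ⟨j, hj, hja⟩ := List.mem_iff_getElem.mp ha
    have hjlt : j < idx := lt_of_lt_of_le hj (by simp [List.length_take])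
    have hjx : j < xs.length := lt_of_lt_of_le hjlt hle
    have := hlt j hjx hjlt
    simp only [List.getElem_take] at hja
    simp [← hja]; omega
  have hdrop : (xs.drop idx).filter (fun f => decide (f < t)) = [] := by
    apply List.filter_eq_nil_iff.mpr
    intro a ha
    obtain ⟨j, hj, hja⟩ := List.mem_iff_getElem.mp ha
    rw [List.getElem_drop] at hja
    have hjx : idx + j < xs.length := by
      have := hj; simp [List.length_drop] at this; omega
    have := hge (idx + j) hjx (Nat.le_add_right _ _)
    simp [← hja]; omega
  conv_lhs => rw [← List.take_append_drop idx xs]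
  rw [List.filter_append, htake, hdrop, List.append_nil]

-- The merge-sweep pointer lands on bisect_left when started at or before it.
theorem pvAdvance_eq_bisectLeft (pool : List Int) (hp : pool.Pairwise (fun a b => a ≤ b))
    (v : Int) (i : Nat) (hi : i ≤ PySem.List.bisectLeft pool v) :
    pvAdvance pool v i = PySem.List.bisectLeft pool v := by
  obtain ⟨hle, hlt, hge⟩ := PySem.List.bisectLeft_spec pool v hp
  set c := PySem.List.bisectLeft pool v with hc
  have main : ∀ n i, pool.length - i ≤ n → i ≤ c → pvAdvance pool v i = c := by
    intro n
    induction n with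
    | zero =>
        intro i hn hic
        rw [pvAdvance]
        have hni : ¬ i < pool.length := by omega
        rw [dif_neg hni]
        omega
    | succ m ih =>
        intro i hn hic
        rw [pvAdvance]
        by_cases hil : i < pool.length
        · rw [dif_pos hil]
          by_cases hpl : pool[i] < v
          · rw [if_pos hpl]
            apply ih _ (by omega)
            by_cases hicc : i < c
            · omega
            · exact absurd hpl (by have := hge i hil (by omega); omega)
          · rw [if_neg hpl]
            by_cases hicc : i < c
            · exact absurd (hlt i hil hicc) hpl
            · omega
        · rw [dif_neg hil]
          omega
  exact main pool.length i (by omega) hi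

-- bisect_left is monotone in the probe value.
theorem bisectLeft_mono (pool : List Int) (hp : pool.Pairwise (fun a b => a ≤ b))
    {v w : Int} (hvw : v ≤ w) :
    PySem.List.bisectLeft pool v ≤ PySem.List.bisectLeft pool w := by
  have hv := filter_lt_eq_take_bisectLeft pool v hp
  have hw := filter_lt_eq_take_bisectLeft pool w hp
  have hlv := (PySem.List.bisectLeft_spec pool v hp).1
  have hlw := (PySem.List.bisectLeft_spec pool w hp).1
  have h1 : (pool.filter (fun f => decide (f < v))).length = PySem.List.bisectLeft pool v := by
    rw [hv, List.length_take]; omega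
  have h2 : (pool.filter (fun f => decide (f < w))).length = PySem.List.bisectLeft pool w := by
    rw [hw, List.length_take]; omega
  rw [← h1, ← h2]
  rw [← List.countP_eq_length_filter, ← List.countP_eq_length_filter]
  exact List.countP_mono_left (fun a _ h => by simp at h ⊢; omega)

-- Keys never inserted by the sweep keep their lookup.
theorem sweep_getD_of_not_mem (pool : List Int) (vs : List Int) (t : Int)
    (ht : t ∉ vs) (st : Nat × PySem.Dict Int Int) :
    ((vs.foldl (fun (st : Nat × PySem.Dict Int Int) v =>
        (pvAdvance pool v st.1, st.2.insert v ((pvAdvance pool v st.1 : Nat) : Int))) st).2).getD t 0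
      = st.2.getD t 0 := by
  induction vs generalizing st with
  | nil => rfl
  | cons v rest ih =>
      simp only [List.foldl_cons]
      rw [ih (fun h => ht (List.mem_cons_of_mem _ h))]
      exact PySem.Dict.getD_insert_of_ne _ _ _ (fun h => ht (h ▸ List.mem_cons_self))

-- After the sweep, every value in the (strictly increasing) list maps to its bisect_left index.
theorem sweep_getD (pool : List Int) (hp : pool.Pairwise (fun a b => a ≤ b))
    (vs : List Int) (hvs : vs.Pairwise (· < ·)) (d0 : PySem.Dict Int Int) (i0 : Nat)
    (hi0 : ∀ v ∈ vs, i0 ≤ PySem.List.bisectLeft pool v) :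
    ∀ t ∈ vs,
      ((vs.foldl (fun (st : Nat × PySem.Dict Int Int) v =>
          (pvAdvance pool v st.1, st.2.insert v ((pvAdvance pool v st.1 : Nat) : Int))) (i0, d0)).2).getD t 0
        = ((PySem.List.bisectLeft pool t : Nat) : Int) := by
  induction vs generalizing d0 i0 with
  | nil => intro t ht; cases ht
  | cons v rest ih =>
      intro t ht
      simp only [List.foldl_cons]
      have hadv : pvAdvance pool v i0 = PySem.List.bisectLeft pool v :=
        pvAdvance_eq_bisectLeft pool hp v i0 (hi0 v List.mem_cons_self)
      have hrest : ∀ w ∈ rest, pvAdvance pool v i0 ≤ PySem.List.bisectLeft pool w := by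
        intro w hw
        rw [hadv]
        exact bisectLeft_mono pool hp (le_of_lt ((List.pairwise_cons.mp hvs).1 w hw))
      rcases List.mem_cons.mp ht with h | h
      · subst h
        have hnot : t ∉ rest := fun hmem =>
          lt_irrefl t ((List.pairwise_cons.mp hvs).1 t hmem)
        rw [sweep_getD_of_not_mem pool rest t hnot]
        simp only [hadv]
        exact PySem.Dict.getD_insert_self _ _ _ _
      · exact ih (List.pairwise_cons.mp hvs).2 _ _ hrest t h

-- The two loop bodies coincide for any sorted pool.
theorem folds_eq (pool : List Int) (hp : pool.Pairwise (fun a b => a ≤ b))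
    (folds : List Int) (min_train_folds : Int) :
    folds.foldl (fun (result : List (List Int × Int)) test_fold =>
      let train_folds := pool.filter (fun f => decide (f < test_fold))
      if (train_folds.length : Int) < min_train_folds then result
      else result ++ [(train_folds, test_fold)]) [] =
    folds.foldl (fun (result : List (List Int × Int)) t =>
      let k := (((PySem.List.sorted (PySem.Set.ofList folds) (fun x => x) false).foldl
          (fun (st : Nat × PySem.Dict Int Int) v =>
            (pvAdvance pool v st.1, st.2.insert v ((pvAdvance pool v st.1 : Nat) : Int)))
          (0, PySem.Dict.empty)).2).getD t 0
      if k ≥ min_train_folds then result ++ [(PySem.List.slice pool none (some k), t)]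
      else result) [] := by
  set vals : List Int := PySem.List.sorted (PySem.Set.ofList folds) (fun x => x) false with hvals
  have hvp : vals.Pairwise (· < ·) := PySem.List.sorted_ofList_pairwise_lt _
  have hlook : ∀ t ∈ folds,
      ((vals.foldl (fun (st : Nat × PySem.Dict Int Int) v =>
          (pvAdvance pool v st.1, st.2.insert v ((pvAdvance pool v st.1 : Nat) : Int))) (0, PySem.Dict.empty)).2).getD t 0
        = ((PySem.List.bisectLeft pool t : Nat) : Int) := by
    intro t ht
    exact sweep_getD pool hp vals hvp PySem.Dict.empty 0 (fun _ _ => Nat.zero_le _) t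
      (by rw [hvals, PySem.List.mem_sorted, PySem.Set.mem_ofList]; exact ht)
  apply PySem.List.foldl_congr_mem
  intro acc t ht
  simp only []
  have hft := filter_lt_eq_take_bisectLeft pool t hp
  have hle := (PySem.List.bisectLeft_spec pool t hp).1
  rw [hlook t ht, hft]
  rw [PySem.List.slice_to_natCast]
  simp only [List.length_take, Nat.min_eq_left hle]
  by_cases hc : ((PySem.List.bisectLeft pool t : Nat) : Int) < min_train_folds
  · rw [if_pos hc, if_neg (by omega)]
  · rw [if_neg hc, if_pos (by omega)]

-- ===== VERDICT (by name: the statement is the Claim_ definition above) =====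
theorem expanding_window_folds_py_spec : Claim_equal_expanding_window_folds_py := by
  intro folds min_train_folds training_pool _
  unfold Spec_expanding_window_folds_py expanding_window_folds_py expanding_window_folds_py_alt
  exact folds_eq _ (PySem.List.sorted_pairwise _ _) folds min_train_folds
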